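-- pv_equiv track=rewrite | github.com/mufeed533/Algo-and-ds | recursion/sort_a_stack.py | merge_stack
-- ===== SOURCE A (Python) =====
-- def merge_stack(i: int, sta: list) -> list:
--     new_stack = list()
--     for _ in range(len(sta)):
--         curr_val = sta.pop()
--         if curr_val <= i:
--             sta.append(curr_val)
--             sta.append(i)
--             break
--         new_stack.append(curr_val)
--
--     if not sta:
--         sta.append(i)
--
--     for _ in range(len(new_stack)):
--         sta.append(new_stack.pop())
--     return sta
-- ===== SOURCE B (Python) =====
-- def merge_stack(i: int, sta: list) -> list:
--     # Canonical recursive insert-into-sorted-stack (mutates sta in place, same object returned).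
--     if not sta or sta[-1] <= i:
--         sta.append(i)
--         return sta
--     top = sta.pop()
--     merge_stack(i, sta)
--     sta.append(top)
--     return sta
-- ===== Notes on version B (the rewrite author's own statement) =====
-- stated objective: simpler
-- what changed: Replaced A's explicit auxiliary stack with two pop/push loops by the canonical recursive pop-recurse-push insertion into the sorted stack.
import Mathlib
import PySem

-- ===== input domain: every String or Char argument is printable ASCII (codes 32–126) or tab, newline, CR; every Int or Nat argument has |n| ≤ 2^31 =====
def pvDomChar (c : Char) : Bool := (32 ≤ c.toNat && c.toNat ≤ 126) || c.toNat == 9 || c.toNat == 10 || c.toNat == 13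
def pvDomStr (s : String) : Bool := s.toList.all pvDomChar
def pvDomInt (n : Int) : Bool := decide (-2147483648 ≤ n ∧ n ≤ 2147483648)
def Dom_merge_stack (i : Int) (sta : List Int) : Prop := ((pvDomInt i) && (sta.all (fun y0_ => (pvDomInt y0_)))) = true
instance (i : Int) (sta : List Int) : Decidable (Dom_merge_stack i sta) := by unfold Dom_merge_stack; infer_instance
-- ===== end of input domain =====

-- B replaces A's explicit auxiliary stack and two loops with the canonical recursive
-- pop-recurse-push insertion (simpler); both mutate sta in place in Python — the theorems
-- here are about the returned value.


-- ===== PORT A =====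
-- first loop of A: runs (fuel = initial length of sta) times; pops the top of sta,
-- either breaks (pushing curr_val and i back) or accumulates curr_val into new_stack
def mergeLoop1 (i : Int) : Nat → List Int → List Int → List Int × List Int
  | 0, sta, ns => (sta, ns)
  | n + 1, sta, ns =>
    match sta.getLast? with
    | none => (sta, ns)                     -- unreachable: fuel ≤ length of sta
    | some curr_val =>
      if curr_val ≤ i then (sta.dropLast ++ [curr_val, i], ns)   -- break
      else mergeLoop1 i n sta.dropLast (ns ++ [curr_val])

def merge_stack (i : Int) (sta : List Int) : List Int :=
  let r := mergeLoop1 i sta.length sta []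
  let sta1 := if r.1 = [] then [i] else r.1   -- "if not sta: sta.append(i)"
  sta1 ++ r.2.reverse                         -- second loop: pop all of new_stack onto sta

-- ===== PORT B =====
def merge_stack_alt (i : Int) (sta : List Int) : List Int :=
  match h : sta.getLast? with
  | none => sta ++ [i]                        -- "if not sta ...: sta.append(i)"
  | some top =>
    if top ≤ i then sta ++ [i]                -- "... or sta[-1] <= i: sta.append(i)"
    else merge_stack_alt i sta.dropLast ++ [top]   -- pop, recurse, push top back
termination_by sta.length
decreasing_by
  cases sta with
  | nil => simp at h
  | cons a l => simp

-- ===== PRECONDITION & SPEC =====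
def Spec_merge_stack (i : Int) (sta : List Int) (out : List Int) : Prop := out = merge_stack_alt i sta
instance (i : Int) (sta : List Int) (out : List Int) : Decidable (Spec_merge_stack i sta out) := by unfold Spec_merge_stack; infer_instance

-- ===== CLAIM (what is proved, stated in full; the proofs are below) =====
def Claim_equal_merge_stack : Prop := ∀ (i : Int) (sta : List Int), Dom_merge_stack i sta → Spec_merge_stack i sta (merge_stack i sta)

-- ===== LEMMAS AND PROOFS =====

theorem alt_nil (i : Int) : merge_stack_alt i [] = [i] := by
  unfold merge_stack_alt; rfl

theorem alt_concat (i x : Int) (xs : List Int) :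
    merge_stack_alt i (xs ++ [x]) =
      if x ≤ i then xs ++ [x, i] else merge_stack_alt i xs ++ [x] := by
  rw [merge_stack_alt]
  split
  next h => simp at h
  next top h =>
    rw [List.getLast?_concat] at h
    injection h with h'
    subst h'
    simp only [List.dropLast_concat]
    split_ifs <;> simp

-- loop invariant: the first loop plus the tail of merge_stack computes B's result,
-- with the accumulated new_stack appended back in reverse
theorem loop1_eq (i : Int) (sta : List Int) : ∀ (ns : List Int),
    (let r := mergeLoop1 i sta.length sta ns
     (if r.1 = [] then [i] else r.1) ++ r.2.reverse) =
      merge_stack_alt i sta ++ ns.reverse := by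
  induction sta using List.reverseRecOn with
  | nil => intro ns; simp [mergeLoop1, alt_nil]
  | append_singleton xs x ih =>
    intro ns
    have hlen : (xs ++ [x]).length = xs.length + 1 := by simp
    rw [hlen]
    show (let r := mergeLoop1 i (xs.length + 1) (xs ++ [x]) ns
          (if r.1 = [] then [i] else r.1) ++ r.2.reverse) = _
    rw [alt_concat]
    simp only [mergeLoop1, List.getLast?_concat, List.dropLast_concat]
    by_cases h : x ≤ i
    · simp [h]
    · simp only [h, if_false]
      rw [ih (ns ++ [x])]
      simp

theorem merge_stack_spec' (i : Int) (sta : List Int) :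
    merge_stack i sta = merge_stack_alt i sta := by
  have := loop1_eq i sta []
  simpa [merge_stack] using this

-- ===== VERDICT (by name: the statement is the Claim_ definition above) =====
theorem merge_stack_spec : Claim_equal_merge_stack := by
  intro i sta _
  unfold Spec_merge_stack
  exact merge_stack_spec' i sta
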